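-- pv_equiv track=rewrite | github.com/cdccnleo/RQA2025 | infrastructure_code_review.py | _categorize_file_sizes
-- ===== SOURCE A (Python) =====
-- from typing import Dict, List, Any
--
-- def _categorize_file_sizes(file_sizes: List[Dict]) -> Dict[str, int]:
--     """分类文件大小"""
--     categories = {'small': 0, 'medium': 0, 'large': 0, 'very_large': 0}
--
--     for file_info in file_sizes:
--         kb = file_info['size_kb']
--         if kb < 10:
--             categories['small'] += 1
--         elif kb < 50:
--             categories['medium'] += 1
--         elif kb < 200:
--             categories['large'] += 1
--         else:
--             categories['very_large'] += 1
--
--     return categories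
-- ===== SOURCE B (Python) =====
-- def _categorize_file_sizes(file_sizes):
--     """分类文件大小"""
--     sizes = [fi['size_kb'] for fi in file_sizes]
--     c10 = sum(kb < 10 for kb in sizes)
--     c50 = sum(kb < 50 for kb in sizes)
--     c200 = sum(kb < 200 for kb in sizes)
--     return {'small': c10, 'medium': c50 - c10,
--             'large': c200 - c50, 'very_large': len(sizes) - c200}
-- ===== Notes on version B (the rewrite author's own statement) =====
-- stated objective: alternative
-- what changed: Instead of bucketing each file in one pass with a branch cascade, B computes three cumulative threshold counts (< 10, < 50, < 200) over the size list in staged passes and obtains each category as a difference of consecutive cumulative counts.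
import Mathlib
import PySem

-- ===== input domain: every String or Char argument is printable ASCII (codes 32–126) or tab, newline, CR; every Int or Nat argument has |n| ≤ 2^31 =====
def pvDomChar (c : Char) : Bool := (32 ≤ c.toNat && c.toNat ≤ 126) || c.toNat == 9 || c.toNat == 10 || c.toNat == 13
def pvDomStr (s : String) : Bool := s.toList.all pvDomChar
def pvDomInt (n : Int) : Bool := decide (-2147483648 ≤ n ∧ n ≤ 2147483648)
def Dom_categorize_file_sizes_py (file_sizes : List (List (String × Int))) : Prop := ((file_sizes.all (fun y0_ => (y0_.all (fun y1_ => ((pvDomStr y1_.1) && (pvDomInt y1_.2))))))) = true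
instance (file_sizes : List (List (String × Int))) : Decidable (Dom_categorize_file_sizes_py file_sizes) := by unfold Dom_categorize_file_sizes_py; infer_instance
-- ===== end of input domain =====

-- B replaces A's per-file branch-cascade bucketing by staged cumulative threshold counts
-- (< 10, < 50, < 200) whose consecutive differences give the categories (objective: alternative).


-- ===== PORT A =====
def categorize_file_sizes_py (file_sizes : List (List (String × Int))) : List (String × Int) :=
  let categories : PySem.Dict String Int :=
    PySem.Dict.ofList [("small", 0), ("medium", 0), ("large", 0), ("very_large", 0)]
  let categories := file_sizes.foldl (fun cats fi =>
      -- fi['size_kb']; Pre_ excludes the KeyError case, so getD's default is never used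
      let kb := (PySem.Dict.mk fi).getD "size_kb" 0
      if kb < 10 then cats.modify "small" 0 (· + 1)
      else if kb < 50 then cats.modify "medium" 0 (· + 1)
      else if kb < 200 then cats.modify "large" 0 (· + 1)
      else cats.modify "very_large" 0 (· + 1)) categories
  categories.items

-- ===== PORT B =====
def categorize_file_sizes_py_alt (file_sizes : List (List (String × Int))) : List (String × Int) :=
  -- sizes = [fi['size_kb'] for fi in file_sizes]; Pre_ excludes the KeyError case
  let sizes := file_sizes.map (fun fi => (PySem.Dict.mk fi).getD "size_kb" 0)
  -- sum(kb < t for kb in sizes): a bool counts as 1/0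
  let c10 : Int := sizes.foldl (fun acc kb => acc + (if kb < 10 then 1 else 0)) 0
  let c50 : Int := sizes.foldl (fun acc kb => acc + (if kb < 50 then 1 else 0)) 0
  let c200 : Int := sizes.foldl (fun acc kb => acc + (if kb < 200 then 1 else 0)) 0
  [("small", c10), ("medium", c50 - c10), ("large", c200 - c50),
   ("very_large", (sizes.length : Int) - c200)]

-- ===== PRECONDITION & SPEC =====
-- Pre_ excludes exactly the inputs where some file_info lacks the key 'size_kb' (Python A raises KeyError there).
def Pre_categorize_file_sizes_py (file_sizes : List (List (String × Int))) : Prop :=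
  (file_sizes.all (fun fi => (PySem.Dict.mk fi).contains "size_kb")) = true
instance (file_sizes : List (List (String × Int))) : Decidable (Pre_categorize_file_sizes_py file_sizes) := by unfold Pre_categorize_file_sizes_py; infer_instance
def pvWitness_categorize_file_sizes_py : (List (List (String × Int))) := [[("size_kb", 7)], [("size_kb", 50)]]
def Spec_categorize_file_sizes_py (file_sizes : List (List (String × Int))) (out : List (String × Int)) : Prop := out = categorize_file_sizes_py_alt file_sizes
instance (file_sizes : List (List (String × Int))) (out : List (String × Int)) : Decidable (Spec_categorize_file_sizes_py file_sizes out) := by unfold Spec_categorize_file_sizes_py; infer_instance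

-- ===== CLAIM =====
def Claim_equal_categorize_file_sizes_py : Prop := ∀ (file_sizes : List (List (String × Int))), Dom_categorize_file_sizes_py file_sizes → Pre_categorize_file_sizes_py file_sizes → Spec_categorize_file_sizes_py file_sizes (categorize_file_sizes_py file_sizes)

-- ===== LEMMAS AND PROOFS =====

-- the per-file key, and the count of keys below a threshold
def pvKey (fi : List (String × Int)) : Int := (PySem.Dict.mk fi).getD "size_kb" 0
def pvCnt (t : Int) (l : List (List (String × Int))) : Int :=
  ((l.map pvKey).map (fun kb => if kb < t then (1 : Int) else 0)).sum

-- A's fold, started from any accumulator values, yields the cumulative-count differences.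
theorem fold_eq_cnt (l : List (List (String × Int))) :
    ∀ (a b c d : Int),
      (l.foldl (fun cats fi =>
          let kb := (PySem.Dict.mk fi).getD "size_kb" 0
          if kb < 10 then cats.modify "small" 0 (· + 1)
          else if kb < 50 then cats.modify "medium" 0 (· + 1)
          else if kb < 200 then cats.modify "large" 0 (· + 1)
          else cats.modify "very_large" 0 (· + 1))
        (PySem.Dict.mk [("small", a), ("medium", b), ("large", c), ("very_large", d)])).items
      = [("small", a + pvCnt 10 l), ("medium", b + (pvCnt 50 l - pvCnt 10 l)),
         ("large", c + (pvCnt 200 l - pvCnt 50 l)),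
         ("very_large", d + ((l.length : Int) - pvCnt 200 l))] := by
  induction l with
  | nil => intro a b c d; simp [pvCnt, PySem.Dict.items]
  | cons fi rest ih =>
      intro a b c d
      simp only [List.foldl_cons]
      have hc : ∀ t : Int, pvCnt t (fi :: rest) = (if pvKey fi < t then (1:Int) else 0) + pvCnt t rest := by
        intro t; simp [pvCnt]
      by_cases h1 : pvKey fi < 10
      · have hA : (PySem.Dict.mk [("small", a), ("medium", b), ("large", c), ("very_large", d)]).modify "small" 0 (· + 1)
            = PySem.Dict.mk [("small", a + 1), ("medium", b), ("large", c), ("very_large", d)] := by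
          simp [PySem.Dict.modify, PySem.Dict.contains, PySem.Dict.insert, PySem.Dict.getD, PySem.Dict.get?]
        simp only [pvKey] at h1
        rw [if_pos h1, hA, ih (a + 1) b c d]
        simp only [hc, pvKey, if_pos h1, if_pos (show (PySem.Dict.mk fi).getD "size_kb" 0 < 50 by omega),
          if_pos (show (PySem.Dict.mk fi).getD "size_kb" 0 < 200 by omega), List.length_cons]
        refine List.ext_getElem (by simp) ?_
        intro i hi hi'
        simp only [List.length_cons, List.length_nil] at hi
        interval_cases i <;> simp <;> push_cast <;> ring
      · by_cases h2 : pvKey fi < 50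
        · have hA : (PySem.Dict.mk [("small", a), ("medium", b), ("large", c), ("very_large", d)]).modify "medium" 0 (· + 1)
              = PySem.Dict.mk [("small", a), ("medium", b + 1), ("large", c), ("very_large", d)] := by
            simp [PySem.Dict.modify, PySem.Dict.contains, PySem.Dict.insert, PySem.Dict.getD, PySem.Dict.get?]
          simp only [pvKey] at h1 h2
          rw [if_neg h1, if_pos h2, hA, ih a (b + 1) c d]
          simp only [hc, pvKey, if_neg h1, if_pos h2,
            if_pos (show (PySem.Dict.mk fi).getD "size_kb" 0 < 200 by omega), List.length_cons]
          refine List.ext_getElem (by simp) ?_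
          intro i hi hi'
          simp only [List.length_cons, List.length_nil] at hi
          interval_cases i <;> simp <;> push_cast <;> ring
        · by_cases h3 : pvKey fi < 200
          · have hA : (PySem.Dict.mk [("small", a), ("medium", b), ("large", c), ("very_large", d)]).modify "large" 0 (· + 1)
                = PySem.Dict.mk [("small", a), ("medium", b), ("large", c + 1), ("very_large", d)] := by
              simp [PySem.Dict.modify, PySem.Dict.contains, PySem.Dict.insert, PySem.Dict.getD, PySem.Dict.get?]
            simp only [pvKey] at h1 h2 h3
            rw [if_neg h1, if_neg h2, if_pos h3, hA, ih a b (c + 1) d]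
            simp only [hc, pvKey, if_neg h1, if_neg h2, if_pos h3, List.length_cons]
            refine List.ext_getElem (by simp) ?_
            intro i hi hi'
            simp only [List.length_cons, List.length_nil] at hi
            interval_cases i <;> simp <;> push_cast <;> ring
          · have hA : (PySem.Dict.mk [("small", a), ("medium", b), ("large", c), ("very_large", d)]).modify "very_large" 0 (· + 1)
                = PySem.Dict.mk [("small", a), ("medium", b), ("large", c), ("very_large", d + 1)] := by
              simp [PySem.Dict.modify, PySem.Dict.contains, PySem.Dict.insert, PySem.Dict.getD, PySem.Dict.get?]
            simp only [pvKey] at h1 h2 h3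
            rw [if_neg h1, if_neg h2, if_neg h3, hA, ih a b c (d + 1)]
            simp only [hc, pvKey, if_neg h1, if_neg h2, if_neg h3, List.length_cons]
            refine List.ext_getElem (by simp) ?_
            intro i hi hi'
            simp only [List.length_cons, List.length_nil] at hi
            interval_cases i <;> simp <;> push_cast <;> ring

-- B's staged fold is the same cumulative count.
theorem foldl_cnt (t : Int) (l : List (List (String × Int))) :
    (l.map (fun fi => (PySem.Dict.mk fi).getD "size_kb" 0)).foldl
        (fun acc kb => acc + (if kb < t then (1 : Int) else 0)) 0 = pvCnt t l := by
  rw [PySem.List.foldl_add]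
  simp only [pvCnt, List.map_map, zero_add]
  rfl

-- ===== VERDICT =====
theorem categorize_file_sizes_py_spec : Claim_equal_categorize_file_sizes_py := by
  intro file_sizes _ _
  unfold Spec_categorize_file_sizes_py categorize_file_sizes_py categorize_file_sizes_py_alt
  have h0 : (PySem.Dict.ofList [("small", 0), ("medium", 0), ("large", 0), ("very_large", 0)] : PySem.Dict String Int)
      = PySem.Dict.mk [("small", 0), ("medium", 0), ("large", 0), ("very_large", 0)] := by rfl
  simp only [foldl_cnt, h0]
  rw [fold_eq_cnt file_sizes 0 0 0 0]
  simp
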